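-- pv_equiv track=rewrite | github.com/rohatgia/algorithm_samples | eulercode/Problem1/problem_1.py | find_closest_ceiling
-- ===== SOURCE A (Python) =====
-- def find_closest_ceiling(multiple, max):
--     #Store a temp for the original max
--     og_max = max
--     #Find the closest number to max which is a multiple
--     while(max%multiple != 0):
--         max = max - 1
--     #If the max is the original value, we have to make sure to exclude it from our count
--     if(max == og_max):
--         return (max - multiple)
--     else:
--         return max
-- ===== SOURCE B (Python) =====
-- def find_closest_ceiling(multiple, max):
--     # Closed-form: one modulo instead of a decrement loop.
--     r = max % abs(multiple)
--     if r == 0: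
--         return max - multiple
--     return max - r
-- ===== Notes on version B (the rewrite author's own statement) =====
-- stated objective: faster
-- what changed: Replaces the O(multiple) decrement-until-divisible loop with a single modulo computation (max - max % |multiple|, stepping down one multiple when max itself is divisible).
import Mathlib
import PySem

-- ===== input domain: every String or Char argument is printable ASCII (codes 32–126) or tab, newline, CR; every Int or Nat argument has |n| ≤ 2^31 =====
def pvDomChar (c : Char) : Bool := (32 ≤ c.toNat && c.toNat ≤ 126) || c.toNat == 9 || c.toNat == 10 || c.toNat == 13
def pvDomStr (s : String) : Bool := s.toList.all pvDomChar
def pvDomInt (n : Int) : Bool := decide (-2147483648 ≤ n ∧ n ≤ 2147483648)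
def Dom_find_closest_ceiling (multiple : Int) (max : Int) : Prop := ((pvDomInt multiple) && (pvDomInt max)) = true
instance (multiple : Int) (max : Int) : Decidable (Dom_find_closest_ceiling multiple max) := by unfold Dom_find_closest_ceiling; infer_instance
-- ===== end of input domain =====

-- B replaces A's O(multiple) decrement loop with one closed-form modulo; objective: faster (asymptotic).


-- ===== PORT A =====
-- helper lemma the port's termination proof cites: one decrement lowers the (positive-divisor) Python mod by 1
theorem pv_mod_sub_one (b x : Int) (hb : 0 < b) (h : PySem.Int.mod x b ≠ 0) :
    PySem.Int.mod (x - 1) b = PySem.Int.mod x b - 1 := by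
  simp only [PySem.Int.mod_eq_emod_of_pos hb] at h ⊢
  have h1 : 0 ≤ x % b := Int.emod_nonneg _ (by omega)
  have h2 : x % b < b := Int.emod_lt_of_pos _ hb
  have hge : 1 ≤ x % b := by omega
  have hb2 : 2 ≤ b := by
    by_contra hlt
    have hb1 : b = 1 := by omega
    subst hb1; omega
  calc (x - 1) % b = (x % b - 1 % b) % b := Int.sub_emod x 1 b
    _ = (x % b - 1) % b := by
      have h3 : (1:Int) % b = 1 := Int.emod_eq_of_lt (by omega) (by omega)
      rw [h3]
    _ = x % b - 1 := Int.emod_eq_of_lt (by omega) (by omega)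

theorem pv_mod_abs_ne {multiple : Int} (x : Int) (h : PySem.Int.mod x multiple ≠ 0) :
    PySem.Int.mod x |multiple| ≠ 0 := by
  intro hz
  exact h ((PySem.Int.mod_eq_zero_iff_dvd x multiple).mpr
    ((abs_dvd _ _).mp ((PySem.Int.mod_eq_zero_iff_dvd x |multiple|).mp hz)))

-- the while loop; the 'multiple = 0' guard only makes it total (Python raises ZeroDivisionError there, excluded by Pre_)
def pvLoopA (multiple : Int) (max : Int) : Int :=
  if _h0 : multiple = 0 then max
  else if _h : PySem.Int.mod max multiple ≠ 0 then pvLoopA multiple (max - 1) else max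
termination_by (PySem.Int.mod max |multiple|).toNat
decreasing_by
  have hb : (0:Int) < |multiple| := abs_pos.mpr _h0
  have h' := pv_mod_abs_ne max _h
  rw [pv_mod_sub_one _ _ hb h']
  have := PySem.Int.mod_nonneg max hb
  omega

def find_closest_ceiling (multiple : Int) (max : Int) : Int :=
  let og_max := max
  let m := pvLoopA multiple max
  if m = og_max then m - multiple else m

-- ===== PORT B =====
def find_closest_ceiling_alt (multiple : Int) (max : Int) : Int :=
  let r := PySem.Int.mod max |multiple|
  if r = 0 then max - multiple else max - r

-- ===== PRECONDITION & SPEC =====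
-- Pre_ excludes exactly multiple = 0, where Python A (and B) raise ZeroDivisionError.
def Pre_find_closest_ceiling (multiple : Int) (max : Int) : Prop := multiple ≠ 0
instance (multiple : Int) (max : Int) : Decidable (Pre_find_closest_ceiling multiple max) := by unfold Pre_find_closest_ceiling; infer_instance
def pvWitness_find_closest_ceiling : Int × Int := (3, 10)

def Spec_find_closest_ceiling (multiple : Int) (max : Int) (out : Int) : Prop := out = find_closest_ceiling_alt multiple max
instance (multiple : Int) (max : Int) (out : Int) : Decidable (Spec_find_closest_ceiling multiple max out) := by unfold Spec_find_closest_ceiling; infer_instance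

-- ===== CLAIM (what is proved, stated in full; the proofs are below) =====
def Claim_equal_find_closest_ceiling : Prop := ∀ (multiple : Int) (max : Int), Dom_find_closest_ceiling multiple max → Pre_find_closest_ceiling multiple max → Spec_find_closest_ceiling multiple max (find_closest_ceiling multiple max)

-- ===== LEMMAS AND PROOFS =====
-- A's loop computes the largest value ≤ max divisible by multiple, i.e. max minus its residue mod |multiple|
theorem pvLoopA_eq (multiple : Int) (h0 : multiple ≠ 0) (max : Int) :
    pvLoopA multiple max = max - PySem.Int.mod max |multiple| := by
  induction max using pvLoopA.induct multiple with
  | case1 max h => exact absurd h h0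
  | case2 max hm hnz ih =>
    have hb : (0:Int) < |multiple| := abs_pos.mpr h0
    rw [pvLoopA, dif_neg hm, dif_pos hnz, ih,
      pv_mod_sub_one _ _ hb (pv_mod_abs_ne max hnz)]
    ring
  | case3 max hm hz =>
    rw [pvLoopA, dif_neg hm, dif_neg hz]
    have hd : multiple ∣ max := (PySem.Int.mod_eq_zero_iff_dvd max multiple).mp (not_not.mp hz)
    have : PySem.Int.mod max |multiple| = 0 :=
      (PySem.Int.mod_eq_zero_iff_dvd max |multiple|).mpr ((abs_dvd _ _).mpr hd)
    omega

-- ===== VERDICT (by name: the statement is the Claim_ definition above) =====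
theorem find_closest_ceiling_spec : Claim_equal_find_closest_ceiling := by
  intro multiple max _ hpre
  unfold Spec_find_closest_ceiling find_closest_ceiling find_closest_ceiling_alt
  rw [pvLoopA_eq multiple hpre max]
  set e := PySem.Int.mod max |multiple| with he
  by_cases hz : e = 0
  · simp [hz]
  · have hne : max - e ≠ max := by intro h; apply hz; omega
    simp [hne, hz]
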